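-- pv_equiv track=rewrite | github.com/Kuan-Ting-Cho/Hierarchical_Gait_Speed_Control_for_Humanoid_Robots_Based_on_DLIPM_Trajectory_Correction | control/Controller.py | Sole_Status
-- ===== SOURCE A (Python) =====
-- def Sole_Status(sensordata):
--     #確認腳底板是否觸地(觸地即picth方向需平行)
--     parallel=[]
--     rise=0
--     for idx in range(0,len(sensordata),2):
--         if sensordata[idx]!=0 or sensordata[idx+1]!=0:
--            parallel.append(1)
--         else:
--            parallel.append(0)
--     #確認腳是否懸空
--     if  parallel[0]+parallel[1]== 0:
--         rise = 2   #左腳懸空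
--     elif parallel[2]+parallel[3]== 0:
--         rise = 1   #右腳懸空
--     elif parallel[0]+parallel[1]+parallel[2]+parallel[3]==4:
--         rise = 0   #DSP
--     elif parallel[0]+parallel[1]+parallel[3]==3:
--         rise = 3   #Switch l2r
--     elif parallel[1]+parallel[2]+parallel[3]==3:
--         rise = 4   #Switch r2l
--     else:
--         rise = 0   #DSP
--
--     return parallel,rise
-- ===== SOURCE B (Python) =====
-- # Table-driven classifier: the rise state is a pure function of the four foot
-- # contact flags, so precompute all 16 cases into a dict once and classify with
-- # a single lookup.
--
-- def _rise(p0, p1, p2, p3):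
--     if p0 + p1 == 0:
--         return 2              # left foot airborne
--     if p2 + p3 == 0:
--         return 1              # right foot airborne
--     if p0 + p1 + p2 + p3 == 4:
--         return 0              # double support
--     if p0 + p1 + p3 == 3:
--         return 3              # switching left to right
--     if p1 + p2 + p3 == 3:
--         return 4              # switching right to left
--     return 0                  # double support
--
--
-- _RISE = {(p0, p1, p2, p3): _rise(p0, p1, p2, p3)
--          for p0 in (0, 1) for p1 in (0, 1)
--          for p2 in (0, 1) for p3 in (0, 1)}
--
--
-- def Sole_Status(sensordata):
--     parallel = [0 if sensordata[i] == 0 and sensordata[i + 1] == 0 else 1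
--                 for i in range(0, len(sensordata), 2)]
--     return parallel, _RISE[tuple(parallel[:4])]
-- ===== Notes on version B (the rewrite author's own statement) =====
-- stated objective: idiomatic
-- what changed: The five-branch if/elif cascade over the four contact flags becomes a single lookup in a 16-entry dict precomputed once, and the flag loop becomes a comprehension; Pre_ excludes inputs yielding fewer than four contact flags, where A either raises IndexError reading parallel[2]/parallel[3] or returns rise=2 only because elif short-circuiting stops before the out-of-range reads (B's table lookup raises KeyError there), and odd-length inputs whose dangling last sensor is zero, where both raise IndexError.
-- outside the precondition, e.g. on Sole_Status([0, 0, 0, 0]): A returns ([0, 0], 2), B raises KeyError; on Sole_Status([0, 0, 0, 0, 0, 0]): A returns ([0, 0, 0], 2), B raises KeyError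
import Mathlib
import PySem

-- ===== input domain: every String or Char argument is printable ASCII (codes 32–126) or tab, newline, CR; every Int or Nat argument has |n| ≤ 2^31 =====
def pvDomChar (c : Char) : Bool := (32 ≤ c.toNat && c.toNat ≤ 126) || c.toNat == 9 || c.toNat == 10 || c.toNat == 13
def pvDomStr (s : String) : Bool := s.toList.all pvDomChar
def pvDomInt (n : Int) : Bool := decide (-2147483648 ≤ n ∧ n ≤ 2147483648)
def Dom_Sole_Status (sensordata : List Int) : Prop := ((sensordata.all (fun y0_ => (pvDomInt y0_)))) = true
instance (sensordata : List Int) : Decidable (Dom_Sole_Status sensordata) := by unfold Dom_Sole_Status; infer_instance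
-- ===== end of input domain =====

-- B replaces A's if/elif cascade over the four contact flags by one lookup in a
-- 16-entry table built once (objective: idiomatic; return value only).

-- ===== PORT A =====
-- pyGetD with default 0 stands for sensordata[idx] / parallel[i]; Python raises
-- IndexError exactly where the default would be used, and Pre_ excludes those inputs.
def Sole_Status (sensordata : List Int) : List Int × Int :=
  let parallel :=
    (PySem.List.pyRange 0 sensordata.length 2).foldl
      (fun parallel idx =>
        if PySem.List.pyGetD sensordata idx 0 ≠ 0 ∨
           PySem.List.pyGetD sensordata (idx + 1) 0 ≠ 0
        then parallel ++ [1] else parallel ++ [0]) []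
  let p0 := PySem.List.pyGetD parallel 0 0
  let p1 := PySem.List.pyGetD parallel 1 0
  let p2 := PySem.List.pyGetD parallel 2 0
  let p3 := PySem.List.pyGetD parallel 3 0
  let rise : Int :=
    if p0 + p1 = 0 then 2
    else if p2 + p3 = 0 then 1
    else if p0 + p1 + p2 + p3 = 4 then 0
    else if p0 + p1 + p3 = 3 then 3
    else if p1 + p2 + p3 = 3 then 4
    else 0
  (parallel, rise)

-- ===== PORT B =====
-- Source B's _rise helper
def pvRise (p0 p1 p2 p3 : Int) : Int :=
  if p0 + p1 = 0 then 2
  else if p2 + p3 = 0 then 1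
  else if p0 + p1 + p2 + p3 = 4 then 0
  else if p0 + p1 + p3 = 3 then 3
  else if p1 + p2 + p3 = 3 then 4
  else 0

-- Source B's module-level dict comprehension; the 4-tuple key is a 4-element list
def pvRiseTable : PySem.Dict (List Int) Int :=
  (([0, 1] : List Int).flatMap fun p0 => ([0, 1] : List Int).flatMap fun p1 =>
   ([0, 1] : List Int).flatMap fun p2 => ([0, 1] : List Int).map fun p3 =>
     ([p0, p1, p2, p3], pvRise p0 p1 p2 p3)).foldl
    (fun d kv => d.insert kv.1 kv.2) PySem.Dict.empty

-- pyGetD 0 stands for sensordata[i]/[i+1] (IndexError) and getD 0 for the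
-- _RISE[...] lookup (KeyError) on inputs where Python B raises; Pre_ excludes those.
def Sole_Status_alt (sensordata : List Int) : List Int × Int :=
  let parallel := (PySem.List.pyRange 0 sensordata.length 2).map
    (fun i => if PySem.List.pyGetD sensordata i 0 = 0 ∧
                 PySem.List.pyGetD sensordata (i + 1) 0 = 0
              then (0 : Int) else 1)
  (parallel, (pvRiseTable.get? (parallel.take 4)).getD 0)

-- ===== PRECONDITION & SPEC =====
-- exactly the inputs on which BOTH Pythons return: at least four full sensor pairs
-- (even length ≥ 8, or odd length ≥ 7 whose dangling last sensor is nonzero so the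
-- short-circuit skips the read past the end). Excluded inputs on which A still
-- returns are those with fewer than four contact flags whose first two flags are
-- zero: there A's rise=2 is reached only because elif short-circuiting stops before
-- the out-of-range reads, and B's table lookup raises KeyError.
def Pre_Sole_Status (sensordata : List Int) : Prop :=
  (sensordata.length % 2 = 0 ∧ 8 ≤ sensordata.length) ∨
  (sensordata.length % 2 = 1 ∧ 7 ≤ sensordata.length ∧ sensordata.getLast? ≠ some 0)
instance (sensordata : List Int) : Decidable (Pre_Sole_Status sensordata) := by
  unfold Pre_Sole_Status; infer_instance

def pvWitness_Sole_Status : List Int := [1, 0, 0, 0, 2, 2, 0, 5]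

def Spec_Sole_Status (sensordata : List Int) (out : List Int × Int) : Prop :=
  out = Sole_Status_alt sensordata
instance (sensordata : List Int) (out : List Int × Int) : Decidable (Spec_Sole_Status sensordata out) := by
  unfold Spec_Sole_Status; infer_instance

-- ===== CLAIM (what is proved, stated in full; the proofs are below) =====
def Claim_equal_Sole_Status : Prop :=
  ∀ (sensordata : List Int), Dom_Sole_Status sensordata →
    Pre_Sole_Status sensordata → Spec_Sole_Status sensordata (Sole_Status sensordata)

-- ===== LEMMAS AND PROOFS =====

theorem pyGetD_lit4 (q0 q1 q2 q3 : Int) (rest : List Int) :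
    PySem.List.pyGetD (q0 :: q1 :: q2 :: q3 :: rest) 0 0 = q0 ∧
    PySem.List.pyGetD (q0 :: q1 :: q2 :: q3 :: rest) 1 0 = q1 ∧
    PySem.List.pyGetD (q0 :: q1 :: q2 :: q3 :: rest) 2 0 = q2 ∧
    PySem.List.pyGetD (q0 :: q1 :: q2 :: q3 :: rest) 3 0 = q3 := by
  refine ⟨?_, ?_, ?_, ?_⟩ <;>
    simp [PySem.List.pyGetD, PySem.List.pyGet?, PySem.List.pyIdx?] <;>
    rw [if_pos (by omega)] <;> simp

-- the number of flags: ⌈len/2⌉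
theorem parallel_length (l : List Int) (f : Int → Int) (h : 7 ≤ l.length) :
    4 ≤ ((PySem.List.pyRange 0 l.length 2).map f).length := by
  rw [List.length_map, PySem.List.pyRange_of_pos _ _ (by norm_num : (0 : Int) < 2),
    List.length_map, List.length_range]
  split <;> omega

-- the table lookup agrees with the cascade on every 0/1 four-tuple
theorem table_eq_cascade (q0 q1 q2 q3 : Int)
    (h0 : q0 = 0 ∨ q0 = 1) (h1 : q1 = 0 ∨ q1 = 1)
    (h2 : q2 = 0 ∨ q2 = 1) (h3 : q3 = 0 ∨ q3 = 1) :
    ((pvRiseTable.get? [q0, q1, q2, q3]).getD 0 : Int)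
      = (if q0 + q1 = 0 then 2
         else if q2 + q3 = 0 then 1
         else if q0 + q1 + q2 + q3 = 4 then 0
         else if q0 + q1 + q3 = 3 then 3
         else if q1 + q2 + q3 = 3 then 4
         else 0) := by
  rcases h0 with h0 | h0 <;> rcases h1 with h1 | h1 <;>
    rcases h2 with h2 | h2 <;> rcases h3 with h3 | h3 <;> subst h0 h1 h2 h3 <;> decide

-- A's five-branch cascade equals B's table lookup on any 0/1 flag list of length ≥ 4
theorem rise_eq (P : List Int) (hmem : ∀ x ∈ P, x = 0 ∨ x = 1) (hlen : 4 ≤ P.length) :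
    (if PySem.List.pyGetD P 0 0 + PySem.List.pyGetD P 1 0 = 0 then (2 : Int)
     else if PySem.List.pyGetD P 2 0 + PySem.List.pyGetD P 3 0 = 0 then 1
     else if PySem.List.pyGetD P 0 0 + PySem.List.pyGetD P 1 0 +
             PySem.List.pyGetD P 2 0 + PySem.List.pyGetD P 3 0 = 4 then 0
     else if PySem.List.pyGetD P 0 0 + PySem.List.pyGetD P 1 0 +
             PySem.List.pyGetD P 3 0 = 3 then 3
     else if PySem.List.pyGetD P 1 0 + PySem.List.pyGetD P 2 0 +
             PySem.List.pyGetD P 3 0 = 3 then 4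
     else 0)
      = (pvRiseTable.get? (P.take 4)).getD 0 := by
  match P, hmem, hlen with
  | q0 :: q1 :: q2 :: q3 :: rest, hmem, _ =>
    obtain ⟨e0, e1, e2, e3⟩ := pyGetD_lit4 q0 q1 q2 q3 rest
    rw [e0, e1, e2, e3,
      show (q0 :: q1 :: q2 :: q3 :: rest).take 4 = [q0, q1, q2, q3] from rfl,
      table_eq_cascade q0 q1 q2 q3
        (hmem q0 (by simp)) (hmem q1 (by simp)) (hmem q2 (by simp)) (hmem q3 (by simp))]

theorem Sole_Status_spec : Claim_equal_Sole_Status := by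
  intro l _ hpre
  show Sole_Status l = Sole_Status_alt l
  unfold Sole_Status Sole_Status_alt
  have hfold :
      (PySem.List.pyRange 0 l.length 2).foldl
        (fun parallel idx =>
          if PySem.List.pyGetD l idx 0 ≠ 0 ∨ PySem.List.pyGetD l (idx + 1) 0 ≠ 0
          then parallel ++ [1] else parallel ++ [0]) []
        = (PySem.List.pyRange 0 l.length 2).map
            (fun i => if PySem.List.pyGetD l i 0 = 0 ∧
                         PySem.List.pyGetD l (i + 1) 0 = 0
                      then (0 : Int) else 1) := by
    have hstep :
        (fun (parallel : List Int) (idx : Int) =>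
          if PySem.List.pyGetD l idx 0 ≠ 0 ∨ PySem.List.pyGetD l (idx + 1) 0 ≠ 0
          then parallel ++ [1] else parallel ++ [0])
        = (fun parallel idx => parallel ++
            [if PySem.List.pyGetD l idx 0 = 0 ∧ PySem.List.pyGetD l (idx + 1) 0 = 0
              then 0 else 1]) := by
      funext p i
      by_cases h0 : PySem.List.pyGetD l i 0 = 0 <;>
        by_cases h1 : PySem.List.pyGetD l (i + 1) 0 = 0 <;> simp [h0, h1]
    rw [hstep, PySem.List.foldl_append_singleton_eq_map, List.nil_append]
  rw [hfold]
  refine congrArg (Prod.mk _) ?_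
  have hmem : ∀ x ∈ (PySem.List.pyRange 0 l.length 2).map
      (fun i => if PySem.List.pyGetD l i 0 = 0 ∧ PySem.List.pyGetD l (i + 1) 0 = 0
                then (0 : Int) else 1), x = 0 ∨ x = 1 := by
    intro x hx
    obtain ⟨i, -, rfl⟩ := List.mem_map.mp hx
    split <;> simp
  refine rise_eq _ hmem (parallel_length l _ ?_)
  rcases hpre with ⟨h1, h2⟩ | ⟨h1, h2, -⟩ <;> omega

-- ===== VERDICT (by name: the statement is the Claim_ definition above) =====
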